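-- pv_equiv track=rewrite | github.com/babiswas/Subsequences | p1.py | find
-- ===== SOURCE A (Python) =====
-- def find(str1,K):
--       ch=''
--       m=dict()
--       for i in str1:
--          count=m.get(i,0)
--          m.update({i:count+1})
--       for i in str1:
--         count=m.get(i)
--         if count>=K:
--            ch+=i
--       return ch
-- ===== SOURCE B (Python) =====
-- def _runs(s, K):
--     # s is sorted, so equal characters sit in contiguous runs; collect
--     # the characters whose run length is at least K, one run per call.
--     if not s:
--         return set()
--     c = s[0]
--     n = 1
--     while n < len(s) and s[n] == c:
--         n += 1
--     keep = _runs(s[n:], K)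
--     if n >= K:
--         keep.add(c)
--     return keep
--
--
-- def find(str1, K):
--     keep = _runs(sorted(str1), K)
--     return ''.join(c for c in str1 if c in keep)
-- ===== Notes on version B (the rewrite author's own statement) =====
-- stated objective: alternative
-- what changed: Replaces A's hash-table frequency count with a sort-then-scan algorithm: B sorts the string, finds each character's frequency as the length of its contiguous run via a recursive run-length scan, and filters the original string by membership in the resulting keep-set.
import Mathlib
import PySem

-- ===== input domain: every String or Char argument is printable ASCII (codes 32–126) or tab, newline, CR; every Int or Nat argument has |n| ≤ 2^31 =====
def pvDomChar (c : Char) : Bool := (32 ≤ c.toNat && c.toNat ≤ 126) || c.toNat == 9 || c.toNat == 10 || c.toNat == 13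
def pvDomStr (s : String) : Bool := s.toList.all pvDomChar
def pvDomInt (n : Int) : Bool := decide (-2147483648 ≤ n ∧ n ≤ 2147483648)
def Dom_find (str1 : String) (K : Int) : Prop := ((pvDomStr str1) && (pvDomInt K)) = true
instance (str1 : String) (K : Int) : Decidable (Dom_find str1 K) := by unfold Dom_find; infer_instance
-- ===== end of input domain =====

-- B replaces A's dict-based frequency table with a sort-then-scan algorithm:
-- it sorts the string, reads each character's frequency off as the length of its
-- contiguous run, and filters the original string by membership in the keep-set
-- (alternative algorithm, not claimed faster).

-- ===== PORT A =====
-- first loop: m.get(i,0); m.update({i: count+1})  = insert i (getD i 0 + 1)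
-- second loop: count = m.get(i) (Option); compare only when present (always is)
def find (str1 : String) (K : Int) : String :=
  let m : PySem.Dict Char Int :=
    str1.toList.foldl (fun d i => d.insert i (d.getD i 0 + 1)) PySem.Dict.empty
  let ch : List Char :=
    str1.toList.foldl (fun ch i =>
      match m.get? i with
      | some count => if count ≥ K then ch ++ [i] else ch
      | none => ch) []
  String.mk ch

-- ===== PORT B =====
-- the 'while n < len(s) and s[n] == c' loop of _runs, counting the equal prefix of t
-- (s = c :: t, so the loop result n is 1 + leadRun c t)
def leadRun (c : Char) : List Char → Nat
  | [] => 0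
  | x :: xs => if x = c then leadRun c xs + 1 else 0

-- _runs: one run per recursive call over the sorted list
def runsScan (s : List Char) (K : Int) : PySem.Set Char :=
  match s with
  | [] => PySem.Set.empty
  | c :: t =>
    let n : Nat := 1 + leadRun c t
    let keep := runsScan (t.drop (leadRun c t)) K
    if (n : Int) ≥ K then PySem.Set.add keep c else keep
termination_by s.length
decreasing_by
  simp

def find_alt (str1 : String) (K : Int) : String :=
  let keep : PySem.Set Char :=
    runsScan (PySem.List.sorted str1.toList (fun x => x) false) K
  String.mk (str1.toList.filter (fun c => PySem.Set.contains keep c))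

-- ===== PRECONDITION & SPEC =====
def Spec_find (str1 : String) (K : Int) (out : String) : Prop := out = find_alt str1 K
instance (str1 : String) (K : Int) (out : String) : Decidable (Spec_find str1 K out) := by unfold Spec_find; infer_instance

-- ===== CLAIM (what is proved, stated in full; the proofs are below) =====
def Claim_equal_find : Prop := ∀ (str1 : String) (K : Int), Dom_find str1 K → Spec_find str1 K (find str1 K)

-- ===== LEMMAS AND PROOFS =====

lemma leadRun_le (c : Char) : ∀ t : List Char, leadRun c t ≤ t.length := by
  intro t
  induction t with
  | nil => simp [leadRun]
  | cons x xs ih =>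
    simp only [leadRun]
    split
    · simp; omega
    · simp


-- the counter dict lookup (A's first loop): present for members, value = count
lemma counter_get?_of_mem (l : List Char) (i : Char) (h : i ∈ l) :
    (l.foldl (fun d x => d.insert x (d.getD x 0 + 1)) PySem.Dict.empty).get? i
      = some ((l.count i : Int)) := by
  rw [PySem.Dict.foldl_insert_getD_add_one_eq_counter]
  have hc : (PySem.Dict.counter l).contains i = true := by
    rw [PySem.Dict.contains_counter]; simp [h]
  have hs := PySem.Dict.contains_eq_isSome_get? (PySem.Dict.counter l) i
  rw [hc] at hs
  obtain ⟨v, hv⟩ := Option.isSome_iff_exists.mp hs.symm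
  have hg := PySem.Dict.getD_counter l i
  rw [PySem.Dict.getD_eq_get?_getD, hv] at hg
  simp at hg
  rw [hv, hg]

-- A's second loop is a filter by total count ≥ K
lemma filter_loop (l full : List Char) (K : Int)
    (h : ∀ i ∈ l, i ∈ full) (acc : List Char) :
    l.foldl (fun ch i =>
      match (full.foldl (fun d x => d.insert x (d.getD x 0 + 1)) PySem.Dict.empty).get? i with
      | some count => if count ≥ K then ch ++ [i] else ch
      | none => ch) acc
    = acc ++ l.filter (fun c => (full.count c : Int) ≥ K) := by
  induction l generalizing acc with
  | nil => simp
  | cons x xs ih =>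
    have hx : x ∈ full := h x (by simp)
    have h' : ∀ i ∈ xs, i ∈ full := fun i hi => h i (List.mem_cons_of_mem _ hi)
    simp only [List.foldl_cons, List.filter_cons, counter_get?_of_mem full x hx]
    by_cases hK : ((full.count x : Int)) ≥ K
    · rw [if_pos hK, ih h' (acc ++ [x])]
      simp only [ge_iff_le] at hK
      simp [hK]
    · rw [if_neg hK, ih h' acc]
      simp only [ge_iff_le] at hK
      simp [hK]

-- on a sorted list c :: t, the while loop captures ALL copies of c: the prefix
-- counted by leadRun is exactly the c's, and the dropped remainder has none
lemma run_facts (c : Char) : ∀ t : List Char, (c :: t).Pairwise (· ≤ ·) →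
    t.count c = leadRun c t ∧ c ∉ t.drop (leadRun c t) := by
  intro t
  induction t with
  | nil => simp [leadRun]
  | cons y t' ih =>
    intro hp
    have hcy : c ≤ y := (List.pairwise_cons.mp hp).1 y (by simp)
    have hyt : (y :: t').Pairwise (· ≤ ·) := (List.pairwise_cons.mp hp).2
    by_cases hy : y = c
    · subst hy
      have hct : (y :: t').Pairwise (· ≤ ·) := hyt
      obtain ⟨h1, h2⟩ := ih hct
      refine ⟨by simp [leadRun, h1], ?_⟩
      simpa [leadRun, h1] using h2
    · have hlt : c < y := lt_of_le_of_ne hcy (fun h => hy h.symm)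
      have hnot : c ∉ y :: t' := by
        intro hmem
        rcases List.mem_cons.mp hmem with h | h
        · exact hy h.symm
        · have := (List.pairwise_cons.mp hyt).1 c h
          exact absurd this (not_le.mpr hlt)
      constructor
      · simpa [leadRun, hy, Ne.symm hy] using List.count_eq_zero.mpr hnot
      · simpa [leadRun, hy] using hnot

-- membership in the run-scan result = total count ≥ K (for a sorted input)
theorem mem_runsScan (K : Int) (x : Char) (s : List Char) (hs : s.Pairwise (· ≤ ·)) :
    x ∈ runsScan s K ↔ x ∈ s ∧ ((s.count x : Int) ≥ K) := by
  match s with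
  | [] =>
    rw [runsScan]
    simp [PySem.Set.empty]
  | c :: t =>
    obtain ⟨hcount, hnot⟩ := run_facts c t hs
    have hd : (t.drop (leadRun c t)).Pairwise (· ≤ ·) :=
      ((List.pairwise_cons.mp hs).2).sublist (List.drop_sublist _ _)
    have ih := mem_runsScan K x (t.drop (leadRun c t)) hd
    have hsplit : t = t.take (leadRun c t) ++ t.drop (leadRun c t) := (List.take_append_drop _ _).symm
    -- the taken prefix consists of c's only
    have htake : ∀ y ∈ t.take (leadRun c t), y = c := by
      have hlen : leadRun c t ≤ t.length := leadRun_le c t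
      have : (t.take (leadRun c t)).count c = leadRun c t := by
        have h1 := List.count_append (l₁ := t.take (leadRun c t)) (l₂ := t.drop (leadRun c t)) (a := c)
        rw [← hsplit] at h1
        have h2 : (t.drop (leadRun c t)).count c = 0 := List.count_eq_zero.mpr hnot
        have h3 : (t.take (leadRun c t)).length = leadRun c t := by simp [hlen]
        omega
      intro y hy
      have h3 : (t.take (leadRun c t)).length = leadRun c t := by simp [leadRun_le c t]
      exact (List.count_eq_length.mp (by rw [this, h3]) y hy).symm
    simp only [runsScan]
    by_cases hK : ((1 + leadRun c t : Nat) : Int) ≥ K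
    · rw [if_pos hK]
      rw [PySem.Set.mem_add, ih]
      by_cases hx : x = c
      · subst hx
        simp only [hnot, false_and, or_true, true_iff, List.mem_cons, true_or, true_and]
        simp [List.count_cons_self, hcount]
        omega
      · have hcx : (c :: t).count x = (t.drop (leadRun c t)).count x := by
          rw [List.count_cons_of_ne (by exact fun h => hx h.symm)]
          conv_lhs => rw [hsplit]
          rw [List.count_append]
          have : (t.take (leadRun c t)).count x = 0 :=
            List.count_eq_zero.mpr (fun hm => hx (htake x hm))
          omega
        have hmx : x ∈ (c :: t) ↔ x ∈ t.drop (leadRun c t) := by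
          constructor
          · intro hm
            rcases List.mem_cons.mp hm with h | h
            · exact absurd h hx
            · rw [hsplit] at h
              rcases List.mem_append.mp h with h | h
              · exact absurd (htake x h) hx
              · exact h
          · intro hm
            exact List.mem_cons_of_mem _ (by rw [hsplit]; exact List.mem_append_right _ hm)
        simp [hx, hcx, hmx]
    · rw [if_neg hK, ih]
      by_cases hx : x = c
      · subst hx
        simp only [hnot, false_and, false_iff, not_and, List.mem_cons]
        intro _
        simp only [List.count_cons_self, hcount]
        push_cast at hK ⊢
        omega
      · have hcx : (c :: t).count x = (t.drop (leadRun c t)).count x := by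
          rw [List.count_cons_of_ne (by exact fun h => hx h.symm)]
          conv_lhs => rw [hsplit]
          rw [List.count_append]
          have : (t.take (leadRun c t)).count x = 0 :=
            List.count_eq_zero.mpr (fun hm => hx (htake x hm))
          omega
        have hmx : x ∈ (c :: t) ↔ x ∈ t.drop (leadRun c t) := by
          constructor
          · intro hm
            rcases List.mem_cons.mp hm with h | h
            · exact absurd h hx
            · rw [hsplit] at h
              rcases List.mem_append.mp h with h | h
              · exact absurd (htake x h) hx
              · exact h
          · intro hm
            exact List.mem_cons_of_mem _ (by rw [hsplit]; exact List.mem_append_right _ hm)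
        rw [hcx, hmx]
termination_by s.length
decreasing_by
  simp

-- ===== VERDICT (by name: the statement is the Claim_ definition above) =====
theorem find_spec : Claim_equal_find := by
  intro str1 K _
  show find str1 K = find_alt str1 K
  unfold find find_alt
  simp only [filter_loop str1.toList str1.toList K (fun i hi => hi) [], List.nil_append]
  congr 1
  apply List.filter_congr
  intro c hc
  have hperm : (PySem.List.sorted str1.toList (fun x => x) false).Perm str1.toList :=
    PySem.List.sorted_perm _ _ _
  have hpw : (PySem.List.sorted str1.toList (fun x => x) false).Pairwise (· ≤ ·) := by
    simpa using PySem.List.sorted_pairwise str1.toList (fun x => x)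
  have hmem := mem_runsScan K c (PySem.List.sorted str1.toList (fun x => x) false) hpw
  rw [hperm.count_eq, hperm.mem_iff] at hmem
  simp only [PySem.Set.contains_eq_listContains, List.contains_eq_mem, decide_eq_decide]
  rw [hmem]
  simp [hc]
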